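-- pv_equiv track=rewrite | github.com/DanielAsztalos/n_puzzle_a_star | a_star.py | nth_to_factoriadic
-- ===== SOURCE A (Python) =====
-- def nth_to_factoriadic(n):
--   if n == 0:
--     return 0
--   remainders = []
--   i = 1
--   while n != 0:
--     remainders.append(str(n % i))
--     n = n//i
--     i += 1
--   remainders.reverse()
--   return int("".join(remainders))
-- ===== SOURCE B (Python) =====
-- def nth_to_factoriadic(n):
--     if n == 0:
--         return 0
--     # factorials 0!..p! where p is the largest position with p! <= n
--     facts = [1]
--     while facts[-1] * len(facts) <= n:
--         facts.append(facts[-1] * len(facts))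
--     # digit at place k comes straight from the ORIGINAL n: (n // k!) % (k+1)
--     digits = [str((n // f) % (k + 1)) for k, f in reversed(list(enumerate(facts)))]
--     return int("".join(digits))
-- ===== Notes on version B (the rewrite author's own statement) =====
-- stated objective: alternative
-- what changed: B replaces A's destructive repeated-division loop (mutating n and growing the divisor) by first precomputing the factorial table 0!..p! for the largest p with p! <= n and then reading each digit directly off the ORIGINAL n as (n // k!) % (k+1), emitted most-significant-first so no reversal of a remainder list is needed.
import Mathlib
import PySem

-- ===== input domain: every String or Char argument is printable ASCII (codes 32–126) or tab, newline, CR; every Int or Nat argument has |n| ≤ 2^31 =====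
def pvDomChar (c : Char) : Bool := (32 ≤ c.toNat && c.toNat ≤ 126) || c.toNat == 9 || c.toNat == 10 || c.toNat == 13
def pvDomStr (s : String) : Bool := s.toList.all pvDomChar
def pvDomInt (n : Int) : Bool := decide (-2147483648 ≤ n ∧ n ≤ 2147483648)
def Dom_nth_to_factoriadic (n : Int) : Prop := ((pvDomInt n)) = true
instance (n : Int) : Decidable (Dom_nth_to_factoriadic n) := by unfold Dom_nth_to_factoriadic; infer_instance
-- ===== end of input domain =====

-- B reads each factoriadic digit off the ORIGINAL n from a precomputed factorial table,
-- most-significant-first, instead of A's destructive repeated-division loop (objective: alternative).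

-- ===== PORT A =====
-- the while loop of A; fuel only makes the recursion total (Python diverges for n < 0,
-- excluded by Pre_; for 0 ≤ n the fuel n.toNat + 2 is proved sufficient below)
def pvGoA (fuel : Nat) (n i : Int) (rem : List String) : List String :=
  match fuel with
  | 0 => rem
  | fuel' + 1 =>
    if n = 0 then rem
    else pvGoA fuel' (PySem.Int.floordiv n i) (i + 1)
           (rem ++ [PySem.Int.toStr (PySem.Int.mod n i)])

def nth_to_factoriadic (n : Int) : Int :=
  if n = 0 then 0
  else
    let remainders := pvGoA (n.toNat + 2) n 1 []
    -- int("".join(...)); on Pre_ the string is a nonempty digit string, so int() never raises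
    (PySem.Int.ofStr? (PySem.Str.join "" remainders.reverse)).getD 0

-- ===== PORT B =====
-- the `while facts[-1] * len(facts) <= n: facts.append(...)` loop of Source B; fuel for totality only
def pvGrow (fuel : Nat) (n : Int) (facts : List Int) : List Int :=
  match fuel with
  | 0 => facts
  | fuel' + 1 =>
    if PySem.List.pyGetD facts (-1) 0 * (facts.length : Int) ≤ n then
      pvGrow fuel' n (facts ++ [PySem.List.pyGetD facts (-1) 0 * (facts.length : Int)])
    else facts

def nth_to_factoriadic_alt (n : Int) : Int :=
  if n = 0 then 0
  else
    let facts := pvGrow (n.toNat + 2) n [1]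
    let digits := ((PySem.List.enumerate facts).reverse).map
      (fun kf => PySem.Int.toStr (PySem.Int.mod (PySem.Int.floordiv n kf.2) (kf.1 + 1)))
    (PySem.Int.ofStr? (PySem.Str.join "" digits)).getD 0

-- ===== PRECONDITION & SPEC =====
-- Pre_ excludes n < 0, on which the Python A's while loop never terminates (n//i stays -1).
def Pre_nth_to_factoriadic (n : Int) : Prop := 0 ≤ n
instance (n : Int) : Decidable (Pre_nth_to_factoriadic n) := by unfold Pre_nth_to_factoriadic; infer_instance
def pvWitness_nth_to_factoriadic : Int := 7

def Spec_nth_to_factoriadic (n : Int) (out : Int) : Prop := out = nth_to_factoriadic_alt n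
instance (n : Int) (out : Int) : Decidable (Spec_nth_to_factoriadic n out) := by unfold Spec_nth_to_factoriadic; infer_instance

-- ===== CLAIM (what is proved, stated in full; the proofs are below) =====
def Claim_equal_nth_to_factoriadic : Prop := ∀ (n : Int), Dom_nth_to_factoriadic n → Pre_nth_to_factoriadic n → Spec_nth_to_factoriadic n (nth_to_factoriadic n)

-- ===== LEMMAS AND PROOFS =====

-- reference digit stream: pvDigits m k = the remainders A would append from state (m, i=k), in order
def pvDigits (m k : Nat) : List String :=
  if hm0 : m = 0 then []
  else PySem.Int.toStr (((m % k : Nat) : Int)) :: pvDigits (m / k) (k + 1)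
termination_by m + (if k ≤ 1 then 1 else 0)
decreasing_by
  rcases Nat.lt_or_ge k 2 with hk | hk
  · interval_cases k <;> simp <;> omega
  · have := Nat.div_lt_self (Nat.pos_of_ne_zero hm0) (by omega : 1 < k)
    split_ifs <;> omega

-- rising factorial ∏_{t<j}(k+t), shaped so that pvRF k (j+1) = k * pvRF (k+1) j
def pvRF (k : Nat) : Nat → Nat
  | 0 => 1
  | j + 1 => k * pvRF (k + 1) j

theorem pvRF_mul_factorial (j k : Nat) : pvRF (k + 1) j * Nat.factorial k = Nat.factorial (k + j) := by
  induction j generalizing k with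
  | zero => simp [pvRF]
  | succ j ih =>
    have := ih (k + 1)
    simp only [pvRF]
    calc (k + 1) * pvRF (k + 2) j * Nat.factorial k
        = pvRF (k + 1 + 1) j * ((k + 1) * Nat.factorial k) := by ring
      _ = pvRF (k + 1 + 1) j * Nat.factorial (k + 1) := by rw [Nat.factorial_succ]
      _ = Nat.factorial (k + 1 + j) := ih (k + 1)
      _ = Nat.factorial (k + (j + 1)) := by ring_nf

theorem pvRF_one (j : Nat) : pvRF 1 j = Nat.factorial j := by
  have := pvRF_mul_factorial j 0
  simpa [Nat.factorial] using this

-- single characterization of pvDigits: index j exists iff m / pvRF k j ≠ 0, with its value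
theorem pvDigits_getElem? (j : Nat) : ∀ (m k : Nat),
    (pvDigits m k)[j]? =
      if m / pvRF k j = 0 then none
      else some (PySem.Int.toStr ((((m / pvRF k j) % (k + j) : Nat)) : Int)) := by
  induction j with
  | zero =>
    intro m k
    rw [pvDigits]
    by_cases h : m = 0
    · rw [dif_pos h]; simp [pvRF, h]
    · rw [dif_neg h]; simp [pvRF, h]
  | succ j ih =>
    intro m k
    rw [pvDigits]
    by_cases h : m = 0
    · rw [dif_pos h]; subst h; simp [Nat.zero_div]
    · rw [dif_neg h, List.getElem?_cons_succ, ih (m / k) (k + 1)]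
      have hdiv : m / k / pvRF (k + 1) j = m / pvRF k (j + 1) := by
        rw [Nat.div_div_eq_div_mul]; rfl
      rw [hdiv]
      have harg : k + 1 + j = k + (j + 1) := by omega
      rw [harg]

-- A's loop computes pvDigits (fuel sufficiency): measure m + 1 + (1 if k = 1)
theorem pvGoA_eq : ∀ (fuel : Nat) (m k : Nat) (rem : List String), 1 ≤ k →
    m + 1 + (if k = 1 then 1 else 0) ≤ fuel →
    pvGoA fuel (m : Int) (k : Int) rem = rem ++ pvDigits m k := by
  intro fuel
  induction fuel with
  | zero => intro m k rem _ hf; exfalso; split_ifs at hf <;> omega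
  | succ fuel ih =>
    intro m k rem hk hf
    rw [pvGoA]
    by_cases hm : m = 0
    · subst hm; rw [pvDigits]; simp
    · have hmz : (m : Int) ≠ 0 := by exact_mod_cast hm
      rw [if_neg hmz]
      have hfd : PySem.Int.floordiv (m : Int) (k : Int) = ((m / k : Nat) : Int) :=
        PySem.Int.floordiv_natCast m k
      have hmd : PySem.Int.mod (m : Int) (k : Int) = ((m % k : Nat) : Int) :=
        PySem.Int.mod_natCast m k
      have hcast : (k : Int) + 1 = ((k + 1 : Nat) : Int) := by push_cast; ring
      rw [hfd, hmd, hcast]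
      have hstep : m / k + 1 + (if k + 1 = 1 then 1 else 0) ≤ fuel := by
        have : (if k + 1 = 1 then 1 else 0) = 0 := by simp; omega
        rw [this]
        by_cases hk1 : k = 1
        · subst hk1; simp at hf ⊢; omega
        · have hklt : 1 < k := by omega
          have : m / k < m := Nat.div_lt_self (Nat.pos_of_ne_zero hm) hklt
          split_ifs at hf <;> omega
      rw [ih (m / k) (k + 1) _ (by omega) hstep]
      conv_rhs => rw [pvDigits]
      rw [dif_neg hm]
      simp

-- facts list 0!..(L-1)!, in Source B built by appending; recursive shape matches the loop
def pvFacts : Nat → List Int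
  | 0 => []
  | L + 1 => pvFacts L ++ [((Nat.factorial L : Nat) : Int)]

theorem pvFacts_length (L : Nat) : (pvFacts L).length = L := by
  induction L with
  | zero => rfl
  | succ L ih => simp [pvFacts, ih]

theorem pvFacts_last (L : Nat) :
    PySem.List.pyGetD (pvFacts (L + 1)) (-1) 0 = ((Nat.factorial L : Nat) : Int) := by
  rw [pvFacts]; exact PySem.List.pyGetD_neg_one_append_singleton _ _ _

-- the grow loop ends at pvFacts M for an M with m < M! and j! ≤ m for the j's in between
theorem pvGrow_eq : ∀ (fuel : Nat) (m L : Nat), 1 ≤ L → m + 2 ≤ fuel + L →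
    ∃ M, pvGrow fuel (m : Int) (pvFacts L) = pvFacts M ∧ L ≤ M ∧
      m < Nat.factorial M ∧ (∀ j, L ≤ j → j < M → Nat.factorial j ≤ m) := by
  intro fuel
  induction fuel with
  | zero =>
    intro m L hL hf
    refine ⟨L, rfl, le_refl L, ?_, by omega⟩
    have : L ≤ Nat.factorial L := Nat.self_le_factorial L
    omega
  | succ fuel ih =>
    intro m L hL hf
    obtain ⟨L', hL'⟩ : ∃ L', L = L' + 1 := ⟨L - 1, by omega⟩
    subst hL'
    rw [pvGrow]
    rw [pvFacts_last, pvFacts_length]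
    by_cases hc : ((Nat.factorial L' : Nat) : Int) * ((L' + 1 : Nat) : Int) ≤ (m : Int)
    · rw [if_pos hc]
      have hfac : Nat.factorial (L' + 1) ≤ m := by
        have : ((Nat.factorial L' * (L' + 1) : Nat) : Int) ≤ (m : Int) := by push_cast at hc ⊢; linarith
        have h2 : Nat.factorial L' * (L' + 1) ≤ m := by exact_mod_cast this
        calc Nat.factorial (L' + 1) = (L' + 1) * Nat.factorial L' := Nat.factorial_succ L'
          _ = Nat.factorial L' * (L' + 1) := by ring
          _ ≤ m := h2
      have hlist : pvFacts (L' + 1) ++ [((Nat.factorial L' : Nat) : Int) * ((L' + 1 : Nat) : Int)]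
          = pvFacts (L' + 1 + 1) := by
        rw [pvFacts]
        congr 1
        simp only [List.cons.injEq, and_true]
        push_cast
        rw [Nat.factorial_succ]
        push_cast
        ring
      rw [hlist]
      obtain ⟨M, hM, hLM, hmM, hall⟩ := ih m (L' + 1 + 1) (by omega) (by omega)
      refine ⟨M, hM, by omega, hmM, ?_⟩
      intro j hj1 hj2
      by_cases hje : j = L' + 1
      · subst hje; exact hfac
      · exact hall j (by omega) hj2
    · rw [if_neg hc]
      refine ⟨L' + 1, rfl, le_refl _, ?_, by omega⟩
      by_contra hnot
      push_neg at hnot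
      apply hc
      have : Nat.factorial L' * (L' + 1) ≤ m := by
        rw [mul_comm, ← Nat.factorial_succ]; exact hnot
      push_cast
      exact_mod_cast this

-- enumerate over an append (shape of pvFacts); structural fact about PySem.List.enumerate
theorem pvEnumerate_append_singleton {α : Type} (xs : List α) (x : α) : ∀ (s : Int),
    PySem.List.enumerate (xs ++ [x]) s
      = PySem.List.enumerate xs s ++ [(s + xs.length, x)] := by
  induction xs with
  | nil => intro s; simp [PySem.List.enumerate_nil, PySem.List.enumerate_cons]
  | cons y ys ih =>
    intro s
    simp only [List.cons_append, PySem.List.enumerate_cons, ih (s + 1), List.length_cons]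
    congr 2
    push_cast
    rw [add_comm ((ys.length : Int)) 1, ← add_assoc]

-- B's digit comprehension over pvFacts M, before the reversal
theorem pvMapEnum (m : Nat) : ∀ (M : Nat),
    (PySem.List.enumerate (pvFacts M)).map
      (fun kf => PySem.Int.toStr (PySem.Int.mod (PySem.Int.floordiv (m : Int) kf.2) (kf.1 + 1)))
    = (List.range M).map
        (fun j => PySem.Int.toStr (((m / Nat.factorial j % (j + 1) : Nat)) : Int)) := by
  intro M
  induction M with
  | zero => simp [pvFacts, PySem.List.enumerate_nil]
  | succ M ih =>
    rw [pvFacts, pvEnumerate_append_singleton, List.map_append, ih, List.range_succ,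
      List.map_append]
    congr 1
    simp only [pvFacts_length, List.map_cons, List.map_nil, List.cons.injEq, and_true]
    rw [zero_add]
    have h1 : PySem.Int.floordiv (m : Int) ((Nat.factorial M : Nat) : Int)
        = ((m / Nat.factorial M : Nat) : Int) := PySem.Int.floordiv_natCast _ _
    rw [h1]
    have h2 : ((M : Int) + 1) = (((M + 1 : Nat) : Nat) : Int) := by push_cast; ring
    rw [h2, PySem.Int.mod_natCast]

-- B's digit list equals pvDigits m 1 (as lists, before joining), given M's characterization
theorem pvRangeEqDigits (m M : Nat) (_hm : 1 ≤ m) (hM : m < Nat.factorial M)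
    (hall : ∀ j, j < M → Nat.factorial j ≤ m) :
    (List.range M).map (fun j => PySem.Int.toStr (((m / Nat.factorial j % (j + 1) : Nat)) : Int))
      = pvDigits m 1 := by
  apply List.ext_getElem?
  intro j
  rw [pvDigits_getElem?]
  rw [pvRF_one]
  by_cases hj : j < M
  · have hle : Nat.factorial j ≤ m := hall j hj
    have hne : m / Nat.factorial j ≠ 0 := by
      have := Nat.factorial_pos j
      have : 1 ≤ m / Nat.factorial j := (Nat.one_le_div_iff (Nat.factorial_pos j)).mpr hle
      omega
    rw [if_neg hne, Nat.add_comm 1 j]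
    rw [List.getElem?_map, List.getElem?_range hj]
    rfl
  · have hge : Nat.factorial M ≤ Nat.factorial j := Nat.factorial_le (by omega)
    have : m / Nat.factorial j = 0 := Nat.div_eq_of_lt (by omega)
    rw [if_pos this]
    rw [List.getElem?_map, List.getElem?_eq_none (by simpa using hj)]
    rfl

-- ===== VERDICT (by name: the statement is the Claim_ definition above) =====
theorem nth_to_factoriadic_spec : Claim_equal_nth_to_factoriadic := by
  intro n _hd hpre
  have h0 : 0 ≤ n := hpre
  unfold Spec_nth_to_factoriadic nth_to_factoriadic nth_to_factoriadic_alt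
  obtain ⟨m, rfl⟩ : ∃ m : Nat, n = (m : Int) := ⟨n.toNat, by omega⟩
  by_cases hz : (m : Int) = 0
  · simp [hz]
  · rw [if_neg hz, if_neg hz]
    have hm0 : m ≠ 0 := by exact_mod_cast hz
    have hm1 : 1 ≤ m := by omega
    simp only [Int.toNat_natCast]
    -- A side
    have hA : pvGoA (m + 2) (m : Int) 1 [] = pvDigits m 1 := by
      have h1 : (1 : Int) = ((1 : Nat) : Int) := rfl
      rw [h1, pvGoA_eq (m + 2) m 1 [] (le_refl 1) (by simp)]
      simp
    -- B side
    obtain ⟨M, hgrow, hLM, hmM, hall⟩ := pvGrow_eq (m + 2) m 1 (le_refl 1) (by omega)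
    have hall' : ∀ j, j < M → Nat.factorial j ≤ m := by
      intro j hj
      by_cases hj0 : j = 0
      · subst hj0; simpa [Nat.factorial] using hm1
      · exact hall j (by omega) hj
    have hfacts1 : ([1] : List Int) = pvFacts 1 := by simp [pvFacts, Nat.factorial]
    rw [hA, hfacts1, hgrow, List.map_reverse, pvMapEnum m M,
      pvRangeEqDigits m M hm1 hmM hall']
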